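-- pv_equiv track=rewrite | github.com/mengxu98/omicverse | omicverse/utils/_metabolights.py | _pick_sample_sheet
-- ===== SOURCE A (Python) =====
-- def _pick_sample_sheet(files: list[str], study_id: str) -> str:
--     """Pick the sample-sheet filename (``s_<ID>.txt``)."""
--     # Case-insensitive match: Metabolights studies are inconsistent
--     # (MTBLS1 uses `s_MTBLS1.txt` but some use lowercase).
--     target = f"s_{study_id}.txt"
--     for f in files:
--         if f.lower() == target.lower():
--             return f
--     # Fall back to any `s_*.txt` if the study has a non-standard name.
--     candidates = [f for f in files if f.lower().startswith("s_")
--                   and f.lower().endswith(".txt")]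
--     if not candidates:
--         raise FileNotFoundError("No sample sheet (s_*.txt) found.")
--     return candidates[0]
-- ===== SOURCE B (Python) =====
-- def _pick_sample_sheet(files: list[str], study_id: str) -> str:
--     """Pick the sample-sheet filename (``s_<ID>.txt``) in a single pass."""
--     target_lower = f"s_{study_id}.txt".lower()
--     fallback = None
--     for f in files:
--         lf = f.lower()
--         if lf == target_lower:
--             return f
--         if fallback is None and lf.startswith("s_") and lf.endswith(".txt"):
--             fallback = f
--     if fallback is None:
--         raise FileNotFoundError("No sample sheet (s_*.txt) found.")
--     return fallback
-- ===== Notes on version B (the rewrite author's own statement) =====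
-- stated objective: simpler
-- what changed: Replaces A's two passes (an exact-match scan followed by building a full candidate list) with one loop that returns on an exact match and records the first s_*.txt fallback in a single accumulator.
import Mathlib
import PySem

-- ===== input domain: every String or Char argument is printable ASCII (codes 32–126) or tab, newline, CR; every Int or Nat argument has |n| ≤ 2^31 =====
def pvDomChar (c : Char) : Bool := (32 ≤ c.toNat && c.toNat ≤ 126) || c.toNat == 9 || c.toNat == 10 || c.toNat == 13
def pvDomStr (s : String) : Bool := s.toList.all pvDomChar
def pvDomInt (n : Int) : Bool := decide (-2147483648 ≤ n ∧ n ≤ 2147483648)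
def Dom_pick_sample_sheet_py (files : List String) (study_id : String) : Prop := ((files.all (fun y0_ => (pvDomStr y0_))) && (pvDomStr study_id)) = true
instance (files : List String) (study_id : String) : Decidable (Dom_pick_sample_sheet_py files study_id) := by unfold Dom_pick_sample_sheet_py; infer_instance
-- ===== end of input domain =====

-- B changes the decomposition: one loop with a single fallback accumulator instead of A's
-- exact-match pass followed by a full candidate-list pass (objective: simpler; same cost).

-- ===== PORT A =====
-- target.lower() for target = f"s_{study_id}.txt", computed on the char-list side (exact)
def pvTargetLower (study_id : String) : List Char :=
  PySem.Chars.lower (('s' :: '_' :: study_id.toList) ++ ['.', 't', 'x', 't'])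

-- f.lower().startswith("s_") and f.lower().endswith(".txt")
def pvIsCand (f : String) : Bool :=
  PySem.Chars.startswith (PySem.Chars.lower f.toList) ['s', '_'] &&
  PySem.Chars.endswith (PySem.Chars.lower f.toList) ['.', 't', 'x', 't']

-- A's first loop: return the first exact (case-insensitive) match
def pickA_exact (files : List String) (tl : List Char) : Option String :=
  match files with
  | [] => none
  | f :: rest => if PySem.Chars.lower f.toList = tl then some f else pickA_exact rest tl

def pick_sample_sheet_py (files : List String) (study_id : String) : String :=
  let tl := pvTargetLower study_id
  match pickA_exact files tl with
  | some f => f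
  | none =>
    match files.filter pvIsCand with
    | [] => ""   -- Python raises FileNotFoundError here; excluded by Pre_
    | c :: _ => c

-- ===== PORT B =====
-- single pass: return on exact match, else remember the first s_*.txt candidate
def pickB_loop (files : List String) (tl : List Char) (fallback : Option String) : Option String :=
  match files with
  | [] => fallback
  | f :: rest =>
    let lf := PySem.Chars.lower f.toList
    if lf = tl then some f
    else
      pickB_loop rest tl
        (match fallback with
         | some _ => fallback
         | none =>
           if PySem.Chars.startswith lf ['s', '_'] && PySem.Chars.endswith lf ['.', 't', 'x', 't']
           then some f else none)

def pick_sample_sheet_py_alt (files : List String) (study_id : String) : String :=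
  match pickB_loop files (pvTargetLower study_id) none with
  | some f => f
  | none => ""   -- Python raises FileNotFoundError here; excluded by Pre_

-- ===== PRECONDITION & SPEC =====
-- Pre_ excludes exactly the inputs where Python A raises FileNotFoundError:
-- no case-insensitive exact match and no s_*.txt candidate among the files.
def Pre_pick_sample_sheet_py (files : List String) (study_id : String) : Prop :=
  (files.any (fun f => decide (PySem.Chars.lower f.toList = pvTargetLower study_id) || pvIsCand f)) = true
instance (files : List String) (study_id : String) : Decidable (Pre_pick_sample_sheet_py files study_id) := by unfold Pre_pick_sample_sheet_py; infer_instance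
def pvWitness_pick_sample_sheet_py : List String × String := (["readme.md", "s_MTBLS1.txt"], "MTBLS1")

def Spec_pick_sample_sheet_py (files : List String) (study_id : String) (out : String) : Prop := out = pick_sample_sheet_py_alt files study_id
instance (files : List String) (study_id : String) (out : String) : Decidable (Spec_pick_sample_sheet_py files study_id out) := by unfold Spec_pick_sample_sheet_py; infer_instance

-- ===== CLAIM (what is proved, stated in full; the proofs are below) =====
def Claim_equal_pick_sample_sheet_py : Prop := ∀ (files : List String) (study_id : String), Dom_pick_sample_sheet_py files study_id → Pre_pick_sample_sheet_py files study_id → Spec_pick_sample_sheet_py files study_id (pick_sample_sheet_py files study_id)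

-- ===== LEMMAS AND PROOFS =====

-- B's single loop equals: A's exact-match scan, else the fallback already recorded,
-- else the head of A's candidate list.
theorem pickB_loop_eq (files : List String) (tl : List Char) (fb : Option String) :
    pickB_loop files tl fb =
      match pickA_exact files tl with
      | some f => some f
      | none =>
        match fb with
        | some x => some x
        | none => (files.filter pvIsCand).head? := by
  induction files generalizing fb with
  | nil => cases fb <;> simp [pickB_loop, pickA_exact]
  | cons f rest ih =>
    simp only [pickB_loop, pickA_exact]
    by_cases h : PySem.Chars.lower f.toList = tl
    · simp [h]
    · simp only [if_neg h, ih]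
      cases fb with
      | some x => simp
      | none =>
        by_cases hc : pvIsCand f
        · simp [List.filter, pvIsCand] at *
          simp [hc.1, hc.2]
        · simp only [pvIsCand, Bool.and_eq_true] at hc
          simp [List.filter, pvIsCand]
          by_cases h1 : PySem.Chars.startswith (PySem.Chars.lower f.toList) ['s', '_'] = true <;>
            simp_all

-- ===== VERDICT (by name: the statement is the Claim_ definition above) =====
theorem pick_sample_sheet_py_spec : Claim_equal_pick_sample_sheet_py := by
  intro files study_id _ _
  unfold Spec_pick_sample_sheet_py pick_sample_sheet_py pick_sample_sheet_py_alt
  rw [pickB_loop_eq]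
  cases h : pickA_exact files (pvTargetLower study_id) <;> simp only [h]
  cases List.filter pvIsCand files <;> simp
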